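-- pv_equiv track=rewrite | github.com/SewoongPark/CodingTest_rep | 프로그래머스/2/42586. 기능개발/기능개발.py | solution
-- ===== SOURCE A (Python) =====
-- import math
--
-- def solution(progresses, speeds):
--   n = len(progresses)
--   date_left = []
--   answer = []
--
--
--   for i in range(n):
--     progresses_left = 100 - progresses[i]
--     cuts = math.ceil(progresses_left / speeds[i])
--     date_left.append(cuts)
--
--
--   while date_left:
--     remain = date_left.pop(0)
--     result = 1
--     while len(date_left) != 0 and remain >= date_left[0]:
--       result += 1
--       date_left.pop(0)
--     answer.append(result)
--   return answer
-- ===== SOURCE B (Python) =====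
-- def solution(progresses, speeds):
--   # deadlines via exact integer ceiling division
--   deadlines = [-((p - 100) // s) for p, s in zip(progresses, speeds)]
--   if not deadlines:
--     return []
--   answer = []
--   lead = deadlines[0]
--   count = 1
--   for d in deadlines[1:]:
--     if d <= lead:
--       count += 1
--     else:
--       answer.append(count)
--       lead = d
--       count = 1
--   answer.append(count)
--   return answer
-- ===== Notes on version B (the rewrite author's own statement) =====
-- stated objective: faster
-- what changed: Replaces the nested while-loops that repeatedly pop(0) from a queue with a single forward scan keeping one running group-leader deadline and a counter (and uses exact integer ceiling division instead of float math.ceil).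
import Mathlib
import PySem

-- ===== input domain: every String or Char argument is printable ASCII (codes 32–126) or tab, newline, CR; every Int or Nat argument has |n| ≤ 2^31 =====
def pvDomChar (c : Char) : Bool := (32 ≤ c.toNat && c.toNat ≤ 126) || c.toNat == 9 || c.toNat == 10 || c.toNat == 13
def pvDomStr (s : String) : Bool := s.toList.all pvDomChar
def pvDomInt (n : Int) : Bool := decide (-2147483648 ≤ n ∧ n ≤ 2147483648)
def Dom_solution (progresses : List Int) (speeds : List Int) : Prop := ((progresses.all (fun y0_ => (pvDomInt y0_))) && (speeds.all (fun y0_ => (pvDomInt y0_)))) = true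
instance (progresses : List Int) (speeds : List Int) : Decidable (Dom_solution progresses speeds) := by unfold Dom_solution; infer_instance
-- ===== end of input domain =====

-- B changes the grouping pass: one linear scan with a running group-leader deadline instead of nested pop(0) loops (simpler).

-- ===== PORT A =====
-- math.ceil((100-p)/s) on this domain (|values| ≤ 2^31, s ≠ 0 by Pre_) equals exact
-- integer ceiling division, ported as -((-(100-p)) // s) with Python floor division.
def pvCeilA (p s : Int) : Int := -(PySem.Int.floordiv (-(100 - p)) s)

-- the 'for i in range(n)' loop building date_left (indexing progresses[i], speeds[i] in step)
def pvDatesA : List Int → List Int → List Int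
  | p :: ps, s :: ss => pvCeilA p s :: pvDatesA ps ss
  | _, _ => []

-- the inner 'while len(date_left) != 0 and remain >= date_left[0]' loop: returns (result, remaining queue)
def pvEatA (remain : Int) : List Int → Int → Int × List Int
  | d :: rest, result => if remain ≥ d then pvEatA remain rest (result + 1) else (result, d :: rest)
  | [], result => (result, [])

theorem pvEatA_len (remain : Int) : ∀ (ds : List Int) (c : Int), (pvEatA remain ds c).2.length ≤ ds.length := by
  intro ds
  induction ds with
  | nil => intro c; simp [pvEatA]
  | cons d rest ih =>
      intro c
      simp only [pvEatA]
      split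
      · exact Nat.le_trans (ih (c + 1)) (Nat.le_succ _)
      · simp

-- the outer 'while date_left' loop
def pvGroupA : List Int → List Int
  | [] => []
  | remain :: rest =>
      let r := pvEatA remain rest 1
      r.1 :: pvGroupA r.2
termination_by ds => ds.length
decreasing_by
  simpa using Nat.lt_succ_of_le (pvEatA_len remain rest 1)

def solution (progresses : List Int) (speeds : List Int) : List Int :=
  pvGroupA (pvDatesA progresses speeds)

-- ===== PORT B =====
-- single forward scan: lead = current group leader deadline, count = current group size
def pvScanB (lead count : Int) : List Int → List Int
  | [] => [count]
  | d :: rest => if d ≤ lead then pvScanB lead (count + 1) rest else count :: pvScanB d 1 rest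

def solution_alt (progresses : List Int) (speeds : List Int) : List Int :=
  let deadlines := (progresses.zip speeds).map (fun q => -(PySem.Int.floordiv (q.1 - 100) q.2))
  match deadlines with
  | [] => []
  | d :: rest => pvScanB d 1 rest

-- ===== PRECONDITION & SPEC =====
-- Pre_ excludes exactly the inputs where A raises: speeds shorter than progresses (IndexError)
-- or a zero speed used by the loop (ZeroDivisionError).
def Pre_solution (progresses : List Int) (speeds : List Int) : Prop :=
  progresses.length ≤ speeds.length ∧ (0 : Int) ∉ speeds.take progresses.length
instance (progresses : List Int) (speeds : List Int) : Decidable (Pre_solution progresses speeds) := by unfold Pre_solution; infer_instance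

def pvWitness_solution : List Int × List Int := ([93, 30, 55], [1, 30, 5])

def Spec_solution (progresses : List Int) (speeds : List Int) (out : List Int) : Prop := out = solution_alt progresses speeds
instance (progresses : List Int) (speeds : List Int) (out : List Int) : Decidable (Spec_solution progresses speeds out) := by unfold Spec_solution; infer_instance

-- ===== CLAIM (what is proved, stated in full; the proofs are below) =====
def Claim_equal_solution : Prop := ∀ (progresses : List Int) (speeds : List Int), Dom_solution progresses speeds → Pre_solution progresses speeds → Spec_solution progresses speeds (solution progresses speeds)

-- ===== LEMMAS AND PROOFS =====

theorem pvDates_eq_map (ps ss : List Int) :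
    pvDatesA ps ss = (ps.zip ss).map (fun q => -(PySem.Int.floordiv (q.1 - 100) q.2)) := by
  induction ps generalizing ss with
  | nil => cases ss <;> simp [pvDatesA]
  | cons p ps ih =>
      cases ss with
      | nil => simp [pvDatesA]
      | cons s ss =>
          simp [pvDatesA, ih, pvCeilA]

theorem pvGroup_eq_scan : ∀ (ds : List Int) (lead c : Int),
    (pvEatA lead ds c).1 :: pvGroupA (pvEatA lead ds c).2 = pvScanB lead c ds := by
  intro ds
  induction ds with
  | nil => intro lead c; simp [pvEatA, pvGroupA, pvScanB]
  | cons d rest ih =>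
      intro lead c
      by_cases h : d ≤ lead
      · have h' : lead ≥ d := h
        simp only [pvEatA, pvScanB, if_pos h']
        exact ih lead (c + 1)
      · have h' : ¬ lead ≥ d := h
        simp only [pvEatA, pvScanB, if_neg h']
        simp only [pvGroupA]
        exact congrArg (List.cons c) (ih d 1)

-- ===== VERDICT (by name: the statement is the Claim_ definition above) =====
theorem solution_spec : Claim_equal_solution := by
  intro ps ss _ _
  unfold Spec_solution solution solution_alt
  rw [pvDates_eq_map]
  cases h : (ps.zip ss).map (fun q => -(PySem.Int.floordiv (q.1 - 100) q.2)) with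
  | nil => simp [pvGroupA]
  | cons d rest =>
      simp only [pvGroupA]
      exact pvGroup_eq_scan rest d 1
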